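-- pv_equiv track=rewrite | github.com/jonyhossan110/StyleLeaker | core/analyzer.py | _detect_cdns
-- ===== SOURCE A (Python) =====
-- from typing import Any, Dict, List, Optional, Set
--
-- CDN_KEYWORDS = ['cdnjs', 'jsdelivr', 'unpkg', 'googleapis', 'stackpath', 'cloudflare']
--
-- def _detect_cdns(html_data: Dict[str, Any], css_data: List[Dict[str, Any]]) -> Set[str]:
--     cdns: Set[str] = set()
--     urls = html_data.get('stylesheet_links', []) + html_data.get('script_sources', [])
--     for css_entry in css_data:
--         urls.append(css_entry.get('url', ''))
--     for url in urls:
--         lower = url.lower()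
--         for keyword in CDN_KEYWORDS:
--             if keyword in lower:
--                 cdns.add(keyword)
--     return cdns
-- ===== SOURCE B (Python) =====
-- CDN_KEYWORDS = ['cdnjs', 'jsdelivr', 'unpkg', 'googleapis', 'stackpath', 'cloudflare']
--
--
-- def _detect_cdns(html_data, css_data):
--     urls = (html_data.get('stylesheet_links', [])
--             + html_data.get('script_sources', [])
--             + [entry.get('url', '') for entry in css_data])
--     found = []  # discovery order; each keyword enters at most once
--     remaining = list(CDN_KEYWORDS)  # keywords not yet detected
--     for url in urls:
--         if not remaining:  # all six detected: stop scanning URLs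
--             break
--         lower = url.lower()
--         still_missing = []
--         for keyword in remaining:
--             if keyword in lower:
--                 found.append(keyword)
--             else:
--                 still_missing.append(keyword)
--         remaining = still_missing
--     return set(found)
-- ===== Notes on version B (the rewrite author's own statement) =====
-- stated objective: alternative
-- what changed: B maintains a shrinking worklist of not-yet-detected keywords and a duplicate-free discovery-ordered found list, partitioning the worklist at each URL and stopping as soon as all six keywords are detected, instead of re-testing all six keywords against every URL and accumulating a set.
import Mathlib
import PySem

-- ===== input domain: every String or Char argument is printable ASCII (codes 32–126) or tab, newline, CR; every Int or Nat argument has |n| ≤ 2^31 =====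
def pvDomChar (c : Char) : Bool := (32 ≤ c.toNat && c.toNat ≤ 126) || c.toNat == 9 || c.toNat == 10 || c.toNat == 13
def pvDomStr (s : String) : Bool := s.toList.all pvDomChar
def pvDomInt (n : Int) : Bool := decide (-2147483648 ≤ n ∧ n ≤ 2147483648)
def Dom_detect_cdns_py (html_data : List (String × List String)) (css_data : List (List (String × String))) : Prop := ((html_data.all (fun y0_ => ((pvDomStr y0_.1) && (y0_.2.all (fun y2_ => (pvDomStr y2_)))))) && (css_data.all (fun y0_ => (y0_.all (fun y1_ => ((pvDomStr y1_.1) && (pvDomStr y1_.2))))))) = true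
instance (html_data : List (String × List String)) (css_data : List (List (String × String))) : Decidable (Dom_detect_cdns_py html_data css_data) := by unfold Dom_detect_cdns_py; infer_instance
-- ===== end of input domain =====

-- B keeps a shrinking worklist of not-yet-found keywords plus a discovery-ordered found list
-- (stopping once all keywords are found) instead of A's re-test of all six keywords per URL into a set;
-- objective: alternative (same worst-case cost, different state maintained). Return values only; no argument is mutated.

def pvCdnKeywords : List String := ["cdnjs", "jsdelivr", "unpkg", "googleapis", "stackpath", "cloudflare"]

-- ===== PORT A =====
def detect_cdns_py (html_data : List (String × List String)) (css_data : List (List (String × String))) : List String :=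
  let urls0 := (PySem.Dict.getD (PySem.Dict.mk html_data) "stylesheet_links" [])
              ++ (PySem.Dict.getD (PySem.Dict.mk html_data) "script_sources" [])
  let urls := css_data.foldl (fun u e => u ++ [PySem.Dict.getD (PySem.Dict.mk e) "url" ""]) urls0
  urls.foldl (fun cdns url =>
    let lower := PySem.Str.lower url
    pvCdnKeywords.foldl (fun c keyword =>
      if PySem.Str.isIn keyword lower then PySem.Set.add c keyword else c) cdns)
    PySem.Set.empty

-- ===== PORT B =====
-- the 'for url in urls' loop with its early 'break' (state: found, remaining)
def pvScanUrls : List String → List String → List String → List String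
  | [], found, _ => found
  | url :: rest, found, remaining =>
    if remaining = [] then found
    else
      let lower := PySem.Str.lower url
      let st := remaining.foldl (fun (q : List String × List String) keyword =>
          if PySem.Str.isIn keyword lower then (q.1 ++ [keyword], q.2) else (q.1, q.2 ++ [keyword]))
        (found, ([] : List String))
      pvScanUrls rest st.1 st.2

def detect_cdns_py_alt (html_data : List (String × List String)) (css_data : List (List (String × String))) : List String :=
  let urls := (PySem.Dict.getD (PySem.Dict.mk html_data) "stylesheet_links" [])
              ++ (PySem.Dict.getD (PySem.Dict.mk html_data) "script_sources" [])
              ++ css_data.map (fun entry => PySem.Dict.getD (PySem.Dict.mk entry) "url" "")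
  PySem.Set.ofList (pvScanUrls urls [] pvCdnKeywords)

-- ===== PRECONDITION & SPEC =====
def Spec_detect_cdns_py (html_data : List (String × List String)) (css_data : List (List (String × String))) (out : List String) : Prop := out = detect_cdns_py_alt html_data css_data
instance (html_data : List (String × List String)) (css_data : List (List (String × String))) (out : List String) : Decidable (Spec_detect_cdns_py html_data css_data out) := by unfold Spec_detect_cdns_py; infer_instance

-- ===== CLAIM (what is proved, stated in full; the proofs are below) =====
def Claim_equal_detect_cdns_py : Prop := ∀ (html_data : List (String × List String)) (css_data : List (List (String × String))), Dom_detect_cdns_py html_data css_data → Spec_detect_cdns_py html_data css_data (detect_cdns_py html_data css_data)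

-- ===== LEMMAS AND PROOFS =====

-- A's inner keyword loop, from an arbitrary already-found set
theorem pv_foldA (p : String → Bool) : ∀ (ks found : List String), ks.Nodup →
    ks.foldl (fun c k => if p k then PySem.Set.add c k else c) found
      = found ++ ks.filter (fun k => p k && !found.contains k) := by
  intro ks
  induction ks with
  | nil => intro found _; simp
  | cons k ks ih =>
    intro found hnd
    have hknotin : k ∉ ks := (List.nodup_cons.mp hnd).1
    have hnd' : ks.Nodup := (List.nodup_cons.mp hnd).2
    simp only [List.foldl_cons, List.filter_cons]
    by_cases hp : p k
    · by_cases hm : k ∈ found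
      · have hadd : PySem.Set.add found k = found := by simp [PySem.Set.add, hm]
        rw [if_pos hp, hadd, ih found hnd']
        simp [hp, hm]
      · have hadd : PySem.Set.add found k = found ++ [k] := by simp [PySem.Set.add, hm]
        rw [if_pos hp, hadd, ih (found ++ [k]) hnd']
        have hf : ks.filter (fun k' => p k' && !(found ++ [k]).contains k')
            = ks.filter (fun k' => p k' && !found.contains k') := by
          apply List.filter_congr
          intro x hx
          have hxk : x ≠ k := fun h => hknotin (h ▸ hx)
          simp [hxk]
        rw [hf]
        simp [hp, hm]
    · rw [if_neg hp]
      rw [ih found hnd']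
      simp [hp]

-- B's inner partition loop, from arbitrary accumulators
theorem pv_foldB (p : String → Bool) : ∀ (rem found still : List String),
    rem.foldl (fun (q : List String × List String) k =>
        if p k then (q.1 ++ [k], q.2) else (q.1, q.2 ++ [k])) (found, still)
      = (found ++ rem.filter p, still ++ rem.filter (fun k => !p k)) := by
  intro rem
  induction rem with
  | nil => intro found still; simp
  | cons k rem ih =>
    intro found still
    by_cases hp : p k <;> simp [hp, ih]

theorem pv_keywords_nodup : pvCdnKeywords.Nodup := by decide

-- unfolding pvScanUrls when the worklist is empty: the scan breaks
theorem pvScanUrls_rem_nil (urls found : List String) :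
    pvScanUrls urls found [] = found := by
  cases urls <;> simp [pvScanUrls]

-- one step of pvScanUrls on a nonempty worklist, via pv_foldB
theorem pvScanUrls_cons (url : String) (rest found remaining : List String)
    (h : remaining ≠ []) :
    pvScanUrls (url :: rest) found remaining =
      pvScanUrls rest
        (found ++ remaining.filter (fun k => PySem.Str.isIn k (PySem.Str.lower url)))
        (remaining.filter (fun k => !PySem.Str.isIn k (PySem.Str.lower url))) := by
  rw [pvScanUrls, if_neg h]
  simp only [pv_foldB, List.nil_append]

-- main loop invariant: B's worklist is exactly the keywords not yet found, in keyword order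
theorem pv_main (urls : List String) : ∀ (found : List String),
    urls.foldl (fun cdns url =>
        let lower := PySem.Str.lower url
        pvCdnKeywords.foldl (fun c keyword =>
          if PySem.Str.isIn keyword lower then PySem.Set.add c keyword else c) cdns) found
      = pvScanUrls urls found (pvCdnKeywords.filter (fun k => !found.contains k)) := by
  induction urls with
  | nil => intro found; simp [pvScanUrls]
  | cons url rest ih =>
    intro found
    simp only [List.foldl_cons]
    have hstep : pvCdnKeywords.foldl (fun c keyword =>
        if PySem.Str.isIn keyword (PySem.Str.lower url) then PySem.Set.add c keyword else c) found
        = found ++ (pvCdnKeywords.filter (fun k => !found.contains k)).filter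
            (fun k => PySem.Str.isIn k (PySem.Str.lower url)) := by
      rw [pv_foldA (fun k => PySem.Str.isIn k (PySem.Str.lower url)) pvCdnKeywords found
            pv_keywords_nodup]
      rw [List.filter_filter]
    by_cases hrem : pvCdnKeywords.filter (fun k => !found.contains k) = []
    · -- every keyword is already found: A's step is a no-op and B breaks
      have hstep0 : pvCdnKeywords.foldl (fun c keyword =>
          if PySem.Str.isIn keyword (PySem.Str.lower url) then PySem.Set.add c keyword else c) found
          = found := by rw [hstep, hrem]; simp
      rw [hstep0, ih found, hrem]
      exact (pvScanUrls_rem_nil rest found).trans (pvScanUrls_rem_nil (url :: rest) found).symm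
    · rw [hstep, ih, pvScanUrls_cons url rest found _ hrem]
      -- align the updated worklist with the invariant for the enlarged found list
      congr 1
      have hrhs : (pvCdnKeywords.filter (fun k => !found.contains k)).filter
            (fun k => !PySem.Str.isIn k (PySem.Str.lower url))
          = pvCdnKeywords.filter
              (fun k => !PySem.Str.isIn k (PySem.Str.lower url) && !found.contains k) :=
        List.filter_filter
      rw [hrhs]
      apply List.filter_congr
      intro x hx
      by_cases hcf : x ∈ found
      · simp [hcf]
      · simp [hcf, hx]

-- A's accumulator is a genuine set: no duplicates
theorem pv_nodup_foldA (urls : List String) : ∀ (found : List String), found.Nodup →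
    (urls.foldl (fun cdns url =>
        let lower := PySem.Str.lower url
        pvCdnKeywords.foldl (fun c keyword =>
          if PySem.Str.isIn keyword lower then PySem.Set.add c keyword else c) cdns) found).Nodup := by
  induction urls with
  | nil => intro found h; simpa using h
  | cons url rest ih =>
    intro found h
    simp only [List.foldl_cons]
    apply ih
    have hks : ∀ (ks : List String) (c : List String), c.Nodup →
        (ks.foldl (fun c keyword =>
          if PySem.Str.isIn keyword (PySem.Str.lower url) then PySem.Set.add c keyword else c) c).Nodup := by
      intro ks
      induction ks with
      | nil => intro c hc; simpa using hc
      | cons k ks ihk =>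
        intro c hc
        simp only [List.foldl_cons]
        by_cases hk : PySem.Str.isIn k (PySem.Str.lower url)
        · rw [if_pos hk]
          exact ihk _ (PySem.Set.nodup_add c k hc)
        · rw [if_neg hk]
          exact ihk _ hc
    exact hks pvCdnKeywords found h

-- ===== VERDICT (by name: the statement is the Claim_ definition above) =====
theorem detect_cdns_py_spec : Claim_equal_detect_cdns_py := by
  intro html_data css_data _
  unfold Spec_detect_cdns_py detect_cdns_py detect_cdns_py_alt
  simp only [PySem.List.foldl_append_singleton_eq_map, List.append_assoc]
  set urls := (PySem.Dict.getD (PySem.Dict.mk html_data) "stylesheet_links" [])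
              ++ ((PySem.Dict.getD (PySem.Dict.mk html_data) "script_sources" [])
              ++ css_data.map (fun entry => PySem.Dict.getD (PySem.Dict.mk entry) "url" "")) with hurls
  have h0 : pvCdnKeywords.filter (fun k => !(([] : List String).contains k)) = pvCdnKeywords := by
    decide
  have hmain := pv_main urls []
  rw [h0] at hmain
  have hnd : (pvScanUrls urls [] pvCdnKeywords).Nodup := by
    rw [← hmain]
    exact pv_nodup_foldA urls [] (by simp)
  rw [PySem.Set.ofList_eq_self_of_nodup _ hnd]
  exact hmain
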